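-- pv_equiv track=rewrite | github.com/PythonFreeCourse/calendar | app/internal/restore_events.py | get_event_ids
-- ===== SOURCE A (Python) =====
-- from typing import List
--
-- def get_event_ids(events_data: List) -> List[str]:
--     """
--     Get the event ids that need to be restored
--
--     Args:
--         events_data: List df events
--
--     Returns:
--         Events id
--     """
--     ids = []
--     check_name = "check"
--     check_on_value = "on"
--
--     is_checkbox_on = False
--     for element, element_value in events_data:
--         if is_checkbox_on:
--             ids.append(element_value)
--             is_checkbox_on = False
--         if element == check_name and element_value == check_on_value:
--             is_checkbox_on = True
--     return ids
-- ===== SOURCE B (Python) =====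
-- def get_event_ids(events_data):
--     """Sliding window over consecutive pairs: whenever the current pair is the
--     ('check', 'on') trigger, the next pair's value is an id to restore."""
--     return [
--         next_value
--         for (element, value), (_, next_value) in zip(events_data, events_data[1:])
--         if element == "check" and value == "on"
--     ]
-- ===== Notes on version B (the rewrite author's own statement) =====
-- stated objective: idiomatic
-- what changed: Replaces the mutable carry-flag state machine with a single comprehension over zipped consecutive pairs that looks ahead to the next value.
import Mathlib
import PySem

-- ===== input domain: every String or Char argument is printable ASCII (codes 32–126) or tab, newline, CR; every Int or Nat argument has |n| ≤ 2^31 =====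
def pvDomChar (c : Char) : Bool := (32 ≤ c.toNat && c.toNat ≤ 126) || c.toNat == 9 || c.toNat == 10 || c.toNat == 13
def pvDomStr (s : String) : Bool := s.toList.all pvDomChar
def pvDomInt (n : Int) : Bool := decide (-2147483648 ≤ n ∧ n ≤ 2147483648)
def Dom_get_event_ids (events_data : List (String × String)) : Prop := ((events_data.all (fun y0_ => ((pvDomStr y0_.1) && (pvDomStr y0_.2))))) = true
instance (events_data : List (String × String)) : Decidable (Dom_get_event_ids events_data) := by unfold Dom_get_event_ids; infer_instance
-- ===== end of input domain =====

-- ===== PORT A =====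
-- loop body: append pending value if flag set, then set flag on ("check","on")
def pvStepA (s : List String × Bool) (p : String × String) : List String × Bool :=
  let s1 := if s.2 = true then (s.1 ++ [p.2], false) else s
  if p.1 = "check" ∧ p.2 = "on" then (s1.1, true) else s1

def get_event_ids (events_data : List (String × String)) : List String :=
  (events_data.foldl pvStepA ([], false)).1

-- ===== PORT B =====
def get_event_ids_alt (events_data : List (String × String)) : List String :=
  (events_data.zip (events_data.drop 1)).filterMap
    (fun q => if q.1.1 = "check" ∧ q.1.2 = "on" then some q.2.2 else none)

-- ===== PRECONDITION & SPEC =====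
def Spec_get_event_ids (events_data : List (String × String)) (out : List String) : Prop := out = get_event_ids_alt events_data
instance (events_data : List (String × String)) (out : List String) : Decidable (Spec_get_event_ids events_data out) := by unfold Spec_get_event_ids; infer_instance

-- ===== CLAIM (what is proved, stated in full; the proofs are below) =====
def Claim_equal_get_event_ids : Prop := ∀ (events_data : List (String × String)), Dom_get_event_ids events_data → Spec_get_event_ids events_data (get_event_ids events_data)

-- ===== LEMMAS AND PROOFS =====

-- ===== VERDICT (by name: the statement is the Claim_ definition above) =====
-- abstract result of A's loop: pending flag b, then rest of the list
def pvG : Bool → List (String × String) → List String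
  | _, [] => []
  | b, (e, v) :: t => (if b then [v] else []) ++ pvG (decide (e = "check" ∧ v = "on")) t

theorem pvStepA_eq (acc : List String) (b : Bool) (p : String × String) :
    pvStepA (acc, b) p
      = (acc ++ (if b then [p.2] else []), decide (p.1 = "check" ∧ p.2 = "on")) := by
  unfold pvStepA
  cases b <;> by_cases h : p.1 = "check" ∧ p.2 = "on" <;> simp [h]

theorem foldA_eq (l : List (String × String)) :
    ∀ (acc : List String) (b : Bool),
      (l.foldl pvStepA (acc, b)).1 = acc ++ pvG b l := by
  induction l with
  | nil => intro acc b; simp [pvG]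
  | cons p t ih =>
      intro acc b
      obtain ⟨e, v⟩ := p
      simp only [List.foldl_cons, pvStepA_eq, ih, pvG, List.append_assoc]

theorem alt_eq_pvG (l : List (String × String)) : get_event_ids_alt l = pvG false l := by
  induction l with
  | nil => rfl
  | cons p t ih =>
      obtain ⟨e, v⟩ := p
      cases t with
      | nil => simp [get_event_ids_alt, pvG]
      | cons q t2 =>
          have ih' := ih
          by_cases h : e = "check" ∧ v = "on" <;>
            simp_all [get_event_ids_alt, pvG]

theorem get_event_ids_spec : Claim_equal_get_event_ids := by
  intro l _
  unfold Spec_get_event_ids get_event_ids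
  rw [foldA_eq, alt_eq_pvG, List.nil_append]
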